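-- pv_equiv track=rewrite | github.com/ari-apc-lab/croupier | forecast/dataset/dataset.py | get_job_metrics_names
-- ===== SOURCE A (Python) =====
-- def get_job_metrics_names(metrics):
--     metric_names = []
--     for partition in metrics.keys(): # Partition iterator
--         for job_id in metrics[partition].keys(): # Jobs iterator
--             for metric_name in metrics[partition][job_id].keys(): # Metrics iterator:
--                 if metric_name not in metric_names:
--                     metric_names.append(metric_name)
--     return metric_names
-- ===== SOURCE B (Python) =====
-- def get_job_metrics_names(metrics):
--     # Phase 1: flatten all metric names, duplicates included.
--     names = [metric_name
--              for partition in metrics.values()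
--              for job in partition.values()
--              for metric_name in job.keys()]
--     # Phase 2: head-and-filter dedup — repeatedly emit the first remaining
--     # name and drop every later copy of it from the stream.
--     result = []
--     while names:
--         head = names[0]
--         result.append(head)
--         names = [n for n in names[1:] if n != head]
--     return result
-- ===== Notes on version B (the rewrite author's own statement) =====
-- stated objective: alternative
-- what changed: B flattens all names first and then deduplicates by repeatedly emitting the head of the remaining stream and filtering out all of its later copies, instead of A's nested loops that test each name for membership in the growing result list.
import Mathlib
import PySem

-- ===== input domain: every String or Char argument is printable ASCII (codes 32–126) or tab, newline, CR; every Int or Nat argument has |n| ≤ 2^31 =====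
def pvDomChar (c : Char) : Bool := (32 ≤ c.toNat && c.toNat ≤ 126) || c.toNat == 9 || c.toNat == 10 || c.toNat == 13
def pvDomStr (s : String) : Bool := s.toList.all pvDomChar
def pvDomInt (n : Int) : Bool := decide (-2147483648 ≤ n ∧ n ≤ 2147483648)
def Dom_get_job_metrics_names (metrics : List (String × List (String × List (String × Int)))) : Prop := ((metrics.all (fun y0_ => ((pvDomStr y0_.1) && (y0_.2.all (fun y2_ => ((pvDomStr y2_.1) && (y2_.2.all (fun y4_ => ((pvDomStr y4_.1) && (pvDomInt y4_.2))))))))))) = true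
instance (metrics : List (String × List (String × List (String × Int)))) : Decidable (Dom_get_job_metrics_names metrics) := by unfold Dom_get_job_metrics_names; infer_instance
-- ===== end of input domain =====

-- ===== PORT A =====
-- B is an alternative algorithm of the same cost: it flattens all names first, then
-- deduplicates by repeatedly emitting the head of the remaining stream and filtering
-- out its later copies, instead of A's membership test against the growing result.
def get_job_metrics_names (metrics : List (String × List (String × List (String × Int)))) : List String :=
  metrics.foldl (fun metric_names partition =>
    partition.2.foldl (fun metric_names job =>
      job.2.foldl (fun metric_names metric =>
        if metric.1 ∈ metric_names then metric_names else metric_names ++ [metric.1])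
        metric_names)
      metric_names)
    []

-- ===== PORT B =====
-- B's while loop: emit the head of the remaining stream, drop all its later copies.
def pvHeadFilterDedup : List String → List String
  | [] => []
  | head :: rest => head :: pvHeadFilterDedup (rest.filter (fun n => n != head))
termination_by l => l.length
decreasing_by
  refine Nat.lt_succ_of_le ?_
  simpa using List.length_filter_le (fun x => x != head) rest

def get_job_metrics_names_alt (metrics : List (String × List (String × List (String × Int)))) : List String :=
  pvHeadFilterDedup
    (metrics.flatMap (fun partition =>
      partition.2.flatMap (fun job =>
        job.2.map (fun metric => metric.1))))

-- ===== PRECONDITION & SPEC =====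
def Spec_get_job_metrics_names (metrics : List (String × List (String × List (String × Int)))) (out : List String) : Prop := out = get_job_metrics_names_alt metrics
instance (metrics : List (String × List (String × List (String × Int)))) (out : List String) : Decidable (Spec_get_job_metrics_names metrics out) := by unfold Spec_get_job_metrics_names; infer_instance

-- ===== CLAIM (what is proved, stated in full; the proofs are below) =====
def Claim_equal_get_job_metrics_names : Prop := ∀ (metrics : List (String × List (String × List (String × Int)))), Dom_get_job_metrics_names metrics → Spec_get_job_metrics_names metrics (get_job_metrics_names metrics)

-- ===== LEMMAS AND PROOFS =====

-- Unfolding equations for B's loop.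
theorem pvHFD_nil : pvHeadFilterDedup [] = [] := by
  rw [pvHeadFilterDedup.eq_def]

theorem pvHFD_cons (x : String) (l : List String) :
    pvHeadFilterDedup (x :: l) = x :: pvHeadFilterDedup (l.filter (fun n => n != x)) := by
  rw [pvHeadFilterDedup.eq_def]

-- Folding over a flattened list equals the nested folds (generic collect step).
theorem pv_foldl_flatMap {α : Type} (l : List α) (g : α → List String) (acc : List String) :
    l.foldl (fun metric_names p =>
      (g p).foldl (fun metric_names x => if x ∈ metric_names then metric_names else metric_names ++ [x]) metric_names) acc
    = (l.flatMap g).foldl (fun metric_names x => if x ∈ metric_names then metric_names else metric_names ++ [x]) acc := by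
  induction l generalizing acc with
  | nil => rfl
  | cons h t ih =>
    simp only [List.foldl_cons, List.flatMap_cons, List.foldl_append, ih]

-- A's inner two loops equal one fold over the flattened job-name list.
theorem pv_jobs_eq (jobs : List (String × List (String × Int))) (acc : List String) :
    jobs.foldl (fun metric_names job =>
      job.2.foldl (fun metric_names metric =>
        if metric.1 ∈ metric_names then metric_names else metric_names ++ [metric.1])
        metric_names) acc
    = (jobs.flatMap (fun job => job.2.map (fun metric => metric.1))).foldl
        (fun metric_names x => if x ∈ metric_names then metric_names else metric_names ++ [x]) acc := by
  have h : ∀ (j : String × List (String × Int)) (a : List String),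
      j.2.foldl (fun metric_names metric =>
        if metric.1 ∈ metric_names then metric_names else metric_names ++ [metric.1]) a
      = (j.2.map (fun metric => metric.1)).foldl
          (fun metric_names x => if x ∈ metric_names then metric_names else metric_names ++ [x]) a := by
    intro j a
    rw [List.foldl_map]
  simp only [h]
  exact pv_foldl_flatMap _ _ _

-- A's three nested loops equal one fold over the fully flattened name list.
theorem pv_parts_eq (metrics : List (String × List (String × List (String × Int)))) (acc : List String) :
    metrics.foldl (fun metric_names partition =>
      partition.2.foldl (fun metric_names job =>
        job.2.foldl (fun metric_names metric =>
          if metric.1 ∈ metric_names then metric_names else metric_names ++ [metric.1])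
          metric_names)
        metric_names) acc
    = (metrics.flatMap (fun partition => partition.2.flatMap (fun job => job.2.map (fun metric => metric.1)))).foldl
        (fun metric_names x => if x ∈ metric_names then metric_names else metric_names ++ [x]) acc := by
  simp only [pv_jobs_eq]
  exact pv_foldl_flatMap _ _ _

-- Core invariant: A's accumulator fold equals acc ++ B's head-filter dedup of the
-- names not already in acc.
theorem pv_foldl_eq_dedup (xs : List String) (acc : List String) :
    xs.foldl (fun metric_names x => if x ∈ metric_names then metric_names else metric_names ++ [x]) acc
    = acc ++ pvHeadFilterDedup (xs.filter (fun y => !acc.contains y)) := by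
  induction xs generalizing acc with
  | nil => simp [pvHFD_nil]
  | cons x t ih =>
    simp only [List.foldl_cons]
    by_cases hx : x ∈ acc
    · rw [if_pos hx, ih]
      have hfilter : ((x :: t).filter (fun y => !acc.contains y))
          = t.filter (fun y => !acc.contains y) := by simp [hx]
      rw [hfilter]
    · rw [if_neg hx, ih]
      have hfilter : ((x :: t).filter (fun y => !acc.contains y))
          = x :: t.filter (fun y => !acc.contains y) := by simp [hx]
      have hkey : t.filter (fun y => !(acc ++ [x]).contains y)
          = (t.filter (fun y => !acc.contains y)).filter (fun n => n != x) := by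
        rw [List.filter_filter]
        apply List.filter_congr
        intro y _
        by_cases h1 : y ∈ acc <;> by_cases h2 : y = x <;>
          simp [h1, h2, List.contains_eq_mem]
      rw [hkey, hfilter, pvHFD_cons]
      simp

-- ===== VERDICT (by name: the statement is the Claim_ definition above) =====
theorem get_job_metrics_names_spec : Claim_equal_get_job_metrics_names := by
  intro metrics _
  show get_job_metrics_names metrics = get_job_metrics_names_alt metrics
  unfold get_job_metrics_names get_job_metrics_names_alt
  rw [pv_parts_eq, pv_foldl_eq_dedup]
  simp
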